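-- pv_equiv track=rewrite | github.com/Mrucznik/wyszukiwarka | source/searchEngine.py | get_postsentence
-- ===== SOURCE A (Python) =====
-- def get_postsentence(text, position):
--     pos = 0
--     found_newlines = 0
--     for c in text[position:]:
--         pos += 1
--         if "\n" in c:
--             found_newlines += 1
--             if found_newlines == 2:
--                 return position+pos-2
-- ===== SOURCE B (Python) =====
-- def get_postsentence(text, position):
--     parts = text[position:].split('\n', 2)
--     if len(parts) < 3:
--         return None
--     return position + len(parts[0]) + len(parts[1])
-- ===== Notes on version B (the rewrite author's own statement) =====
-- stated objective: simpler
-- what changed: Replaces the explicit char-by-char loop with newline and position counters by a single split('\n', 2) on text[position:] and summing the lengths of the first two parts.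
import Mathlib
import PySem

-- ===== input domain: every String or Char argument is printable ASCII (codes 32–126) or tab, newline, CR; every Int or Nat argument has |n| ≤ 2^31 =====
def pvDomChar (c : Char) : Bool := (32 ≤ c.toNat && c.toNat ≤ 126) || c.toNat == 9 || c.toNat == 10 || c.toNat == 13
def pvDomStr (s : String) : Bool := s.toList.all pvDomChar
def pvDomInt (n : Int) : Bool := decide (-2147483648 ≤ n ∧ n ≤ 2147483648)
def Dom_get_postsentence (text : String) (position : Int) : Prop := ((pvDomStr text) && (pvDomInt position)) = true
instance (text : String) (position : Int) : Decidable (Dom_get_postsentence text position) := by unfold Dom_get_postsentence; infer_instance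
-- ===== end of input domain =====

-- B replaces A's character-counting loop by one split('\n', 2) call and summing the first two parts' lengths (simpler decomposition; return value only, no side effects).


-- ===== PORT A =====
-- A's for-loop over text[position:]: pos counts consumed chars, found counts newlines,
-- returns position+pos-2 at the second newline.  ("\n" in c) for a 1-char string c is c == '\n'.
def pvLoopA : List Char → Int → Int → Int → Option Int
  | [], _, _, _ => none
  | c :: rest, position, pos, found =>
    let pos := pos + 1
    if c == '\n' then
      let found := found + 1
      if found == 2 then some (position + pos - 2)
      else pvLoopA rest position pos found
    else pvLoopA rest position pos found

def get_postsentence (text : String) (position : Int) : Option Int :=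
  pvLoopA (PySem.Str.slice text (some position) none).toList position 0 0

-- ===== PORT B =====
def get_postsentence_alt (text : String) (position : Int) : Option Int :=
  match PySem.Str.splitMax? (PySem.Str.slice text (some position) none) "\n" 2 with
  | none => none   -- unreachable: separator "\n" is nonempty
  | some parts =>
    if parts.length < 3 then none
    else some (position + (PySem.Str.len (parts.getD 0 "")) + (PySem.Str.len (parts.getD 1 "")))

-- ===== PRECONDITION & SPEC =====
def Spec_get_postsentence (text : String) (position : Int) (out : Option Int) : Prop := out = get_postsentence_alt text position
instance (text : String) (position : Int) (out : Option Int) : Decidable (Spec_get_postsentence text position out) := by unfold Spec_get_postsentence; infer_instance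

-- ===== CLAIM (what is proved, stated in full; the proofs are below) =====
def Claim_equal_get_postsentence : Prop := ∀ (text : String) (position : Int), Dom_get_postsentence text position → Spec_get_postsentence text position (get_postsentence text position)

-- ===== LEMMAS AND PROOFS =====

-- reference: 0-based index of the (k+1)-st newline of a character list
def pvNthNl : List Char → Nat → Option Nat
  | [], _ => none
  | c :: l, k =>
    if c = '\n' then
      (if k = 0 then some 0 else (pvNthNl l (k - 1)).map (· + 1))
    else (pvNthNl l k).map (· + 1)

lemma pvLoopA_one (l : List Char) : ∀ (position pos : Int),
    pvLoopA l position pos 1 = (pvNthNl l 0).map (fun i => position + pos + i - 1) := by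
  induction l with
  | nil => intro position pos; simp [pvLoopA, pvNthNl]
  | cons c rest ih =>
    intro position pos
    by_cases hc : c = '\n'
    · simp [pvLoopA, pvNthNl, hc]; ring
    · simp [pvLoopA, pvNthNl, hc, ih]
      cases pvNthNl rest 0 <;> simp <;> ring

lemma pvLoopA_zero (l : List Char) : ∀ (position pos : Int),
    pvLoopA l position pos 0 = (pvNthNl l 1).map (fun i => position + pos + i - 1) := by
  induction l with
  | nil => intro position pos; simp [pvLoopA, pvNthNl]
  | cons c rest ih =>
    intro position pos
    by_cases hc : c = '\n'
    · simp [pvLoopA, pvNthNl, hc, pvLoopA_one]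
      cases pvNthNl rest 0 <;> simp <;> ring
    · simp [pvLoopA, pvNthNl, hc, ih]
      cases pvNthNl rest 1 <;> simp <;> ring

-- B-side value of a raw split result (at List Char level)
def pvBVal (parts : List (List Char)) : Option Int :=
  if parts.length < 3 then none
  else some ((parts.getD 0 []).length + ((parts.getD 1 []).length : Int))

lemma pvGo_zero (fuel : Nat) (l p0 p1 : List Char) :
    PySem.Chars.splitOnMax.go ['\n'] fuel 0 l [] [p1, p0] = [p0, p1, l] := by
  cases fuel <;> cases l <;> simp [PySem.Chars.splitOnMax.go]

lemma pvGo_one (l : List Char) : ∀ (fuel : Nat) (cur p0 : List Char), l.length < fuel →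
    pvBVal (PySem.Chars.splitOnMax.go ['\n'] fuel 1 l cur [p0]) =
      (pvNthNl l 0).map (fun i => (p0.length : Int) + cur.length + i) := by
  induction l with
  | nil =>
    intro fuel cur p0 h
    cases fuel with
    | zero => omega
    | succ f => simp [PySem.Chars.splitOnMax.go, pvBVal, pvNthNl]
  | cons c rest ih =>
    intro fuel cur p0 h
    cases fuel with
    | zero => omega
    | succ f =>
      by_cases hc : c = '\n'
      · simp only [PySem.Chars.splitOnMax.go, hc]
        simp [List.isPrefixOf, pvGo_zero, pvBVal, pvNthNl]
      · simp only [PySem.Chars.splitOnMax.go]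
        have hp : List.isPrefixOf ['\n'] (c :: rest) = false := by
          simp only [List.isPrefixOf, Bool.and_eq_false_iff]
          exact Or.inl (by simp; exact fun h => hc h.symm)
        simp only [hp, if_neg (by omega : ¬ (1 = 0)), Bool.false_eq_true, if_false]
        rw [ih f (c :: cur) p0 (by simpa using Nat.lt_of_succ_lt_succ h)]
        simp [pvNthNl, hc]
        cases pvNthNl rest 0 <;> simp <;> ring
  
lemma pvGo_two (l : List Char) : ∀ (fuel : Nat) (cur : List Char), l.length < fuel →
    pvBVal (PySem.Chars.splitOnMax.go ['\n'] fuel 2 l cur []) =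
      (pvNthNl l 1).map (fun i => (cur.length : Int) + i - 1) := by
  induction l with
  | nil =>
    intro fuel cur h
    cases fuel with
    | zero => omega
    | succ f => simp [PySem.Chars.splitOnMax.go, pvBVal, pvNthNl]
  | cons c rest ih =>
    intro fuel cur h
    cases fuel with
    | zero => omega
    | succ f =>
      by_cases hc : c = '\n'
      · simp only [PySem.Chars.splitOnMax.go, hc]
        simp only [show List.isPrefixOf ['\n'] ('\n' :: rest) = true by simp [List.isPrefixOf]]
        norm_num
        rw [pvGo_one rest f [] cur.reverse (by simpa using Nat.lt_of_succ_lt_succ h)]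
        simp [pvNthNl]
        cases pvNthNl rest 0 <;> simp <;> ring
      · simp only [PySem.Chars.splitOnMax.go]
        have hp : List.isPrefixOf ['\n'] (c :: rest) = false := by
          simp only [List.isPrefixOf, Bool.and_eq_false_iff]
          exact Or.inl (by simp; exact fun h => hc h.symm)
        simp only [hp, if_neg (by omega : ¬ (2 = 0)), Bool.false_eq_true, if_false]
        rw [ih f (c :: cur) (by simpa using Nat.lt_of_succ_lt_succ h)]
        simp [pvNthNl, hc]
        cases pvNthNl rest 1 <;> simp <;> ring

-- ===== VERDICT (by name: the statement is the Claim_ definition above) =====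
theorem get_postsentence_spec : Claim_equal_get_postsentence := by
  intro text position _
  unfold Spec_get_postsentence get_postsentence get_postsentence_alt
  set L := (PySem.Str.slice text (some position) none).toList with hL
  rw [pvLoopA_zero]
  have hsplit : PySem.Str.splitMax? (PySem.Str.slice text (some position) none) "\n" 2 =
      some ((PySem.Chars.splitOnMax L ['\n'] 2).map String.ofList) := by
    simp [PySem.Str.splitMax?, PySem.Chars.splitMax?, hL]
  rw [hsplit]
  have hgo : pvBVal (PySem.Chars.splitOnMax L ['\n'] 2) =
      (pvNthNl L 1).map (fun i => ((([] : List Char).length : Int)) + i - 1) := by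
    have : PySem.Chars.splitOnMax L ['\n'] 2 =
        PySem.Chars.splitOnMax.go ['\n'] (L.length + 1) 2 L [] [] := by
      simp [PySem.Chars.splitOnMax]
    rw [this]
    exact pvGo_two L (L.length + 1) [] (by omega)
  set parts := PySem.Chars.splitOnMax L ['\n'] 2 with hp
  simp only [pvBVal] at hgo
  by_cases hlen : parts.length < 3
  · simp only [List.length_map, hlen, if_true]
    simp only [hlen, if_true] at hgo
    cases hnl : pvNthNl L 1 with
    | none => simp
    | some i => rw [hnl] at hgo; simp at hgo
  · simp only [List.length_map, hlen, if_false]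
    simp only [hlen, if_false] at hgo
    cases hnl : pvNthNl L 1 with
    | none => simp [hnl] at hgo
    | some i =>
      simp only [hnl] at hgo ⊢
      have h0 : PySem.Str.len ((parts.map String.ofList).getD 0 "") = ((parts.getD 0 []).length : Nat) := by
        match parts with
        | a :: b :: c :: t => simp [PySem.Str.len]
        | [] => simp at hlen
        | [a] => simp at hlen
        | [a, b] => simp at hlen
      have h1 : PySem.Str.len ((parts.map String.ofList).getD 1 "") = ((parts.getD 1 []).length : Nat) := by
        match parts with
        | a :: b :: c :: t => simp [PySem.Str.len]
        | [] => simp at hlen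
        | [a] => simp at hlen
        | [a, b] => simp at hlen
      rw [h0, h1]
      simp at hgo ⊢
      omega
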